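-- pv_equiv track=rewrite | github.com/TheErickLiu/TSA-Data-Science | src/combineData.py | collapse_sentiment_by_date
-- ===== SOURCE A (Python) =====
-- from collections import Counter, defaultdict
-- from typing import Dict, List, Tuple
--
-- def collapse_sentiment_by_date(
--     sentiment_list: List[List[str]],
-- ) -> List[List[str]]:
--
--     combined_dict = defaultdict(list)
--     price_dict = defaultdict(list)
--
--     for i, sent in enumerate(sentiment_list):
--         (date, time, winner) = sent[:3]
--         price_dict[date] = sent[3:]
--
--         if date not in combined_dict:
--             combined_dict[date] = defaultdict(list)
--         if winner not in combined_dict[date]: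
--             combined_dict[date][winner] = set()
--         combined_dict[date][winner].add(time)
--
--     combined_list = []
--     for date in combined_dict:
--         counts = []
--         for v in ["true", "false", "inconclusive"]:
--             cnt = 0
--             if v in combined_dict[date]:
--                 cnt = len(combined_dict[date][v])
--             counts.append(str(cnt))
--         rec = [date] + counts + price_dict[date]
--         combined_list.append(rec)
--
--     return combined_list
-- ===== SOURCE B (Python) =====
-- from typing import List
--
--
-- def collapse_sentiment_by_date(
--     sentiment_list: List[List[str]],
-- ) -> List[List[str]]:
--     # Dict-free staged computation: ordered dedup of dates, then for each date
--     # rescan the input to count distinct times per label and take the last price.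
--     result = []
--     for date in dict.fromkeys(row[0] for row in sentiment_list):
--         counts = [
--             str(len({row[1] for row in sentiment_list
--                      if row[0] == date and row[2] == v}))
--             for v in ("true", "false", "inconclusive")
--         ]
--         price = next(row[3:] for row in reversed(sentiment_list)
--                      if row[0] == date)
--         result.append([date] + counts + price)
--     return result
-- ===== Notes on version B (the rewrite author's own statement) =====
-- stated objective: alternative
-- what changed: Replaces A's single-pass accumulation into a nested dict-of-dict-of-sets by a dict-free staged computation: an ordered dedup of the dates, then for each date a fresh rescan of the input counting distinct times per label and a reverse scan for the last price slice.
import Mathlib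
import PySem

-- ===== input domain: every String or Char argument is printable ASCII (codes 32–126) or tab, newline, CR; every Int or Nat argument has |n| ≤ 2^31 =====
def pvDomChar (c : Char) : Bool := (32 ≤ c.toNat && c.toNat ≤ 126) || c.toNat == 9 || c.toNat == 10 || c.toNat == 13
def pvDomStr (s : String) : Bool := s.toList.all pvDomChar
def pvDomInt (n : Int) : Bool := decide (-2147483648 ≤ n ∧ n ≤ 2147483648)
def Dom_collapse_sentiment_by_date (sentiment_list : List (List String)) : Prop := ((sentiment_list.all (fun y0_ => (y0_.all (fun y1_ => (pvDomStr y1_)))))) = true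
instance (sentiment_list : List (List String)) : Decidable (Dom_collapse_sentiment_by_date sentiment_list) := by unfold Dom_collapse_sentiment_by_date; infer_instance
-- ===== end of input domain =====

-- B replaces A's single-pass accumulation into nested dicts of sets by a dict-free
-- staged computation (ordered dedup of dates, then per-date rescans); alternative, not faster.

-- ===== PORT A =====
-- one step of A's loop over a row with at least the three unpacked fields
def pvStepA (st : PySem.Dict String (PySem.Dict String (PySem.Set String)) × PySem.Dict String (List String))
    (date time winner : String) (rest : List String) :
    PySem.Dict String (PySem.Dict String (PySem.Set String)) × PySem.Dict String (List String) :=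
  let price := st.2.insert date rest
  let combined := if st.1.contains date then st.1 else st.1.insert date PySem.Dict.empty
  let inner := combined.getD date PySem.Dict.empty
  let inner := if inner.contains winner then inner else inner.insert winner PySem.Set.empty
  let inner := inner.insert winner (PySem.Set.add (inner.getD winner PySem.Set.empty) time)
  (combined.insert date inner, price)

-- one row of A's loop (a row shorter than 3 raises ValueError in Python: outside Pre_)
def pvRowA (st : PySem.Dict String (PySem.Dict String (PySem.Set String)) × PySem.Dict String (List String))
    (sent : List String) :
    PySem.Dict String (PySem.Dict String (PySem.Set String)) × PySem.Dict String (List String) :=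
  match sent with
  | date :: time :: winner :: rest => pvStepA st date time winner rest
  | _ => st

def collapse_sentiment_by_date (sentiment_list : List (List String)) : List (List String) :=
  let st := sentiment_list.foldl pvRowA (PySem.Dict.empty, PySem.Dict.empty)
  st.1.items.map (fun p =>
    let counts := ["true", "false", "inconclusive"].foldl (fun acc v =>
      acc ++ [PySem.Int.toStr (if p.2.contains v then ((p.2.getD v PySem.Set.empty).length : Int) else 0)]) []
    p.1 :: counts ++ st.2.getD p.1 [])

-- ===== PORT B =====
-- row[i] for i = 0,1,2 (inside Pre_ every row has ≥ 3 fields, so getD is exact there)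
def pvFld (r : List String) (i : Nat) : String := r.getD i ""

def collapse_sentiment_by_date_alt (sentiment_list : List (List String)) : List (List String) :=
  (PySem.List.dedup (sentiment_list.map (fun r => pvFld r 0))).map (fun date =>
    let counts := ["true", "false", "inconclusive"].map (fun v =>
      PySem.Int.toStr (((PySem.Set.ofList
        ((sentiment_list.filter (fun r => pvFld r 0 == date && pvFld r 2 == v)).map
          (fun r => pvFld r 1))).length : Int)))
    let price := ((sentiment_list.reverse.find? (fun r => pvFld r 0 == date)).getD []).drop 3
    date :: counts ++ price)

-- ===== PRECONDITION & SPEC =====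
-- Pre_ excludes exactly the rows with fewer than three fields, on which A's tuple
-- unpacking raises ValueError (and B raises IndexError).
def Pre_collapse_sentiment_by_date (sentiment_list : List (List String)) : Prop :=
  ∀ sent ∈ sentiment_list, 3 ≤ sent.length
instance (sentiment_list : List (List String)) : Decidable (Pre_collapse_sentiment_by_date sentiment_list) := by unfold Pre_collapse_sentiment_by_date; infer_instance

def pvWitness_collapse_sentiment_by_date : List (List String) :=
  [["2016-01-01", "09:00", "true", "1.5"], ["2016-01-01", "10:00", "false", "1.7"]]

def Spec_collapse_sentiment_by_date (sentiment_list : List (List String)) (out : List (List String)) : Prop := out = collapse_sentiment_by_date_alt sentiment_list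
instance (sentiment_list : List (List String)) (out : List (List String)) : Decidable (Spec_collapse_sentiment_by_date sentiment_list out) := by unfold Spec_collapse_sentiment_by_date; infer_instance

-- ===== CLAIM =====
def Claim_equal_collapse_sentiment_by_date : Prop := ∀ (sentiment_list : List (List String)), Dom_collapse_sentiment_by_date sentiment_list → Pre_collapse_sentiment_by_date sentiment_list → Spec_collapse_sentiment_by_date sentiment_list (collapse_sentiment_by_date sentiment_list)

-- ===== LEMMAS AND PROOFS =====

-- invariant carried through A's fold: after processing the prefix `pre` (all rows ≥ 3 fields),
-- A's state is fully characterised in terms of `pre`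
def pvInv (pre : List (List String))
    (st : PySem.Dict String (PySem.Dict String (PySem.Set String)) × PySem.Dict String (List String)) : Prop :=
  st.1.keys = PySem.Set.ofList (pre.map (fun r => pvFld r 0)) ∧
  st.1.keys.Nodup ∧
  (∀ d w, (st.1.getD d PySem.Dict.empty).getD w PySem.Set.empty =
      PySem.Set.ofList ((pre.filter (fun r => pvFld r 0 == d && pvFld r 2 == w)).map (fun r => pvFld r 1))) ∧
  (∀ d, st.2.getD d [] = ((pre.reverse.find? (fun r => pvFld r 0 == d)).getD []).drop 3)

theorem pvOfList_append_singleton {α : Type} [BEq α] (xs : List α) (x : α) :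
    PySem.Set.ofList (xs ++ [x]) = PySem.Set.add (PySem.Set.ofList xs) x := by
  rw [PySem.Set.ofList_eq_foldl, PySem.Set.ofList_eq_foldl, List.foldl_append]
  rfl

theorem pvInv_init : pvInv [] (PySem.Dict.empty, PySem.Dict.empty) := by
  refine ⟨rfl, by simp [PySem.Dict.keys, PySem.Dict.empty], ?_, ?_⟩
  · intro d w; simp [PySem.Dict.getD_empty, PySem.Set.empty, PySem.Set.ofList]
  · intro d; simp [PySem.Dict.getD_empty]

theorem pvInv_step (pre : List (List String))
    (st : PySem.Dict String (PySem.Dict String (PySem.Set String)) × PySem.Dict String (List String))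
    (date time winner : String) (rest : List String)
    (h : pvInv pre st) :
    pvInv (pre ++ [date :: time :: winner :: rest]) (pvStepA st date time winner rest) := by
  obtain ⟨hk, hnd, hin, hpr⟩ := h
  -- the inner dict fetched for `date` is st.1.getD date in both contains cases
  have hinner0 : (if st.1.contains date then st.1 else st.1.insert date PySem.Dict.empty).getD date PySem.Dict.empty
      = st.1.getD date PySem.Dict.empty := by
    by_cases hc : st.1.contains date
    · simp [hc]
    · simp only [hc, Bool.false_eq_true, if_false, PySem.Dict.getD_insert_self]
      rw [PySem.Dict.getD_of_not_contains _ _ (by simpa using hc)]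
  have hkeysC : (if st.1.contains date then st.1 else st.1.insert date PySem.Dict.empty).keys
      = PySem.Set.add st.1.keys date := by
    by_cases hc : st.1.contains date
    · simp only [hc, if_true]
      rw [PySem.Set.add_of_mem (by rw [← PySem.Dict.contains_iff_mem_keys]; exact hc)]
    · simp only [hc, Bool.false_eq_true, if_false]
      rw [PySem.Dict.keys_insert_of_not_contains _ _ (by simpa using hc),
        PySem.Set.add_of_not_mem (by rw [← PySem.Dict.contains_iff_mem_keys]; simpa using hc)]
  have hcontC : (if st.1.contains date then st.1 else st.1.insert date PySem.Dict.empty).contains date = true := by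
    by_cases hc : st.1.contains date
    · simp [hc]
    · simp [hc, PySem.Dict.contains_insert_self]
  refine ⟨?_, ?_, ?_, ?_⟩
  · -- keys
    show ((if st.1.contains date then st.1 else st.1.insert date PySem.Dict.empty).insert date _).keys = _
    rw [PySem.Dict.keys_insert_of_contains _ _ hcontC, hkeysC, hk, List.map_append]
    simp only [List.map_cons, List.map_nil]
    rw [pvOfList_append_singleton]
    simp [pvFld]
  · -- nodup keys
    show ((if st.1.contains date then st.1 else st.1.insert date PySem.Dict.empty).insert date _).keys.Nodup
    by_cases hc : st.1.contains date
    · simp only [hc, if_true]; exact PySem.Dict.nodup_keys_insert _ _ _ hnd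
    · simp only [hc, Bool.false_eq_true, if_false]
      exact PySem.Dict.nodup_keys_insert _ _ _ (PySem.Dict.nodup_keys_insert _ _ _ hnd)
  · -- inner sets
    intro d w
    show (((if st.1.contains date then st.1 else st.1.insert date PySem.Dict.empty).insert date _).getD d PySem.Dict.empty).getD w PySem.Set.empty = _
    rw [List.filter_append, List.map_append]
    by_cases hd : d = date
    · subst hd
      rw [PySem.Dict.getD_insert_self, hinner0]
      have hIval : ((if (st.1.getD d PySem.Dict.empty).contains winner then st.1.getD d PySem.Dict.empty
            else (st.1.getD d PySem.Dict.empty).insert winner PySem.Set.empty).getD winner PySem.Set.empty)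
          = (st.1.getD d PySem.Dict.empty).getD winner PySem.Set.empty := by
        by_cases hcw : (st.1.getD d PySem.Dict.empty).contains winner
        · simp [hcw]
        · simp only [hcw, Bool.false_eq_true, if_false, PySem.Dict.getD_insert_self]
          rw [PySem.Dict.getD_of_not_contains _ _ (by simpa using hcw)]
      by_cases hw : w = winner
      · subst hw
        rw [PySem.Dict.getD_insert_self, hIval, hin d w]
        have hcnd : (pvFld (d :: time :: w :: rest) 0 == d && pvFld (d :: time :: w :: rest) 2 == w) = true := by
          simp [pvFld]
        simp only [List.filter_cons, List.filter_nil, hcnd, if_true, List.map_cons, List.map_nil]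
        rw [pvOfList_append_singleton]
        rfl
      · rw [PySem.Dict.getD_insert_of_ne _ _ _ hw]
        -- w ≠ winner, so the guarded insert at winner does not touch w
        have hIw : ((if (st.1.getD d PySem.Dict.empty).contains winner then st.1.getD d PySem.Dict.empty
              else (st.1.getD d PySem.Dict.empty).insert winner PySem.Set.empty).getD w PySem.Set.empty)
            = (st.1.getD d PySem.Dict.empty).getD w PySem.Set.empty := by
          by_cases hcw : (st.1.getD d PySem.Dict.empty).contains winner
          · simp [hcw]
          · simp only [hcw, Bool.false_eq_true, if_false]
            rw [PySem.Dict.getD_insert_of_ne _ _ _ hw]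
        rw [hIw, hin d w]
        have hcnd : (pvFld (d :: time :: winner :: rest) 0 == d && pvFld (d :: time :: winner :: rest) 2 == w) = false := by
          simp [pvFld]; exact fun hww => hw hww.symm
        simp [hcnd]
    · rw [PySem.Dict.getD_insert_of_ne _ _ _ hd]
      have hC : (if st.1.contains date then st.1 else st.1.insert date PySem.Dict.empty).getD d PySem.Dict.empty
          = st.1.getD d PySem.Dict.empty := by
        by_cases hc : st.1.contains date
        · simp [hc]
        · simp only [hc, Bool.false_eq_true, if_false]
          rw [PySem.Dict.getD_insert_of_ne _ _ _ hd]
      have hcnd : (pvFld (date :: time :: winner :: rest) 0 == d && pvFld (date :: time :: winner :: rest) 2 == w) = false := by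
        simp [pvFld]; intro hdd; exact absurd hdd.symm hd
      rw [hC, hin d w]
      simp [hcnd]
  · -- prices
    intro d
    show (st.2.insert date rest).getD d [] = _
    rw [List.reverse_append]
    simp only [List.reverse_cons, List.reverse_nil, List.nil_append, List.cons_append,
      List.find?_cons]
    by_cases hd : d = date
    · subst hd
      rw [PySem.Dict.getD_insert_self]
      have : (pvFld (d :: time :: winner :: rest) 0 == d) = true := by simp [pvFld]
      rw [this]
      simp
    · rw [PySem.Dict.getD_insert_of_ne _ _ _ hd]
      have : (pvFld (date :: time :: winner :: rest) 0 == d) = false := by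
        simp [pvFld]; exact fun h => hd h.symm
      rw [this]
      exact hpr d

theorem pvInv_fold (l : List (List String)) (pre : List (List String))
    (st : PySem.Dict String (PySem.Dict String (PySem.Set String)) × PySem.Dict String (List String))
    (hl : ∀ r ∈ l, 3 ≤ r.length) (h : pvInv pre st) :
    pvInv (pre ++ l) (l.foldl pvRowA st) := by
  induction l generalizing pre st with
  | nil => simpa using h
  | cons sent tl ih =>
    rcases sent with _ | ⟨date, _ | ⟨time, _ | ⟨winner, rest⟩⟩⟩
    · exact absurd (hl [] (by simp)) (by simp)
    · exact absurd (hl [date] (by simp)) (by simp)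
    · exact absurd (hl [date, time] (by simp)) (by simp)
    · have := ih (pre ++ [date :: time :: winner :: rest])
        (pvStepA st date time winner rest)
        (fun r hr => hl r (by simp [hr]))
        (pvInv_step pre st date time winner rest h)
      simpa [List.append_assoc] using this

-- ===== VERDICT =====
theorem collapse_sentiment_by_date_spec : Claim_equal_collapse_sentiment_by_date := by
  intro sl _hdom hpre
  unfold Spec_collapse_sentiment_by_date
  unfold collapse_sentiment_by_date collapse_sentiment_by_date_alt
  dsimp only
  obtain ⟨hk, hnd, hin, hpr⟩ :=
    pvInv_fold sl [] (PySem.Dict.empty, PySem.Dict.empty) hpre pvInv_init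
  simp only [List.nil_append] at hk hin hpr
  set st := sl.foldl pvRowA (PySem.Dict.empty, PySem.Dict.empty) with hst
  rw [PySem.Dict.items_eq_map_keys st.1 hnd PySem.Dict.empty, hk, List.map_map,
    PySem.List.dedup_eq_ofList]
  refine List.map_congr_left ?_
  intro d _hd
  simp only [Function.comp]
  have hcounts : ∀ v, (if (st.1.getD d PySem.Dict.empty).contains v then
        (((st.1.getD d PySem.Dict.empty).getD v PySem.Set.empty).length : Int) else 0)
      = ((PySem.Set.ofList ((sl.filter (fun r => pvFld r 0 == d && pvFld r 2 == v)).map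
          (fun r => pvFld r 1))).length : Int) := by
    intro v
    rw [← hin d v]
    by_cases hc : (st.1.getD d PySem.Dict.empty).contains v
    · simp [hc]
    · rw [PySem.Dict.getD_of_not_contains (st.1.getD d PySem.Dict.empty) PySem.Set.empty
        (by simpa using hc)]
      simp [hc, PySem.Set.empty]
  rw [PySem.List.foldl_append_singleton_eq_map]
  simp only [List.nil_append, List.map_cons, List.map_nil, hcounts, hpr d]
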